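-- pv_equiv track=rewrite | github.com/oleksadobush/skyscrapers_puzzles | puzzle.py | check_raw_uniqueness
-- ===== SOURCE A (Python) =====
-- def check_raw_uniqueness(board):
--     """
--     Check board of unique number in each row.
--
--     Return True if each in a row have unique number, False otherwise.
--
--     >>> check_raw_uniqueness(["**** ****", "***1 ****", "**  3****", "* 4 1****", "     9 5 ",\
-- " 6  83  *", "3   1  **", "  8  2***", "  2  ****"])
--     True
--     >>> check_raw_uniqueness(["**** ****", "***1 ****", "**3 3****", "* 4 1****", "     9 5 ",\
-- " 6  83  *", "3   1  **", "  8  2***", "  2  ****"])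
--     False
--     """
--     for numbers in board:
--         new = []
--         for each in numbers:
--             if each != '*' and each != ' ':
--                 new.append(each)
--         if len(new) != len(set(new)):
--             return False
--     return True
-- ===== SOURCE B (Python) =====
-- def check_raw_uniqueness(board):
--     for row in board:
--         chars = sorted(c for c in row if c != '*' and c != ' ')
--         for a, b in zip(chars, chars[1:]):
--             if a == b:
--                 return False
--     return True
-- ===== Notes on version B (the rewrite author's own statement) =====
-- stated objective: alternative
-- what changed: Detects duplicates per row by sorting the filtered characters and scanning adjacent pairs for an equal neighbour, instead of A's building a filtered list and comparing len(list) to len(set(list)); no set is used.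
import Mathlib
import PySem

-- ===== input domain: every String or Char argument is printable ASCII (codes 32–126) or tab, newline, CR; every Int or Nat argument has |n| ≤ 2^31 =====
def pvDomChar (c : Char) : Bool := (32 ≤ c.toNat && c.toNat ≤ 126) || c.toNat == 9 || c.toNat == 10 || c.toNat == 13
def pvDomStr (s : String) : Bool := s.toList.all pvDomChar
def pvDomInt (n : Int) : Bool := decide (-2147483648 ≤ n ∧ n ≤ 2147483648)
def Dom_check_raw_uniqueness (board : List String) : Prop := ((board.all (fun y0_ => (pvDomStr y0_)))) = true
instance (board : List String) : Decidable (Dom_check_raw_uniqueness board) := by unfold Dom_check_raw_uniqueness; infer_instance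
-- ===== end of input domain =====

-- B detects a duplicate per row by sorting the filtered characters and scanning for
-- an equal adjacent pair, instead of A's filtered-list vs set length comparison
-- (alternative algorithm: sort-and-adjacent-scan, no set).


-- ===== PORT A =====
-- 'new = []; for each in numbers: if each != '*' and each != ' ': new.append(each)'
def pvRowNew (numbers : String) : List Char :=
  numbers.toList.foldl (fun new each => if each ≠ '*' ∧ each ≠ ' ' then new ++ [each] else new) []

def check_raw_uniqueness : List String → Bool
  | [] => true
  | numbers :: rest =>
    let new := pvRowNew numbers
    if new.length ≠ (PySem.Set.ofList new).length then false
    else check_raw_uniqueness rest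

-- ===== PORT B =====
-- 'for a, b in zip(chars, chars[1:]): if a == b: return False'
def pvAdjDup : List Char → Bool
  | a :: b :: t => a == b || pvAdjDup (b :: t)
  | _ => false

def check_raw_uniqueness_alt : List String → Bool
  | [] => true
  | row :: rest =>
    let chars := PySem.List.sorted (row.toList.filter (fun c => decide (c ≠ '*' ∧ c ≠ ' '))) (fun x => x) false
    !pvAdjDup chars && check_raw_uniqueness_alt rest

-- ===== PRECONDITION & SPEC =====
def Spec_check_raw_uniqueness (board : List String) (out : Bool) : Prop := out = check_raw_uniqueness_alt board
instance (board : List String) (out : Bool) : Decidable (Spec_check_raw_uniqueness board out) := by unfold Spec_check_raw_uniqueness; infer_instance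

-- ===== CLAIM =====
def Claim_equal_check_raw_uniqueness : Prop := ∀ (board : List String), Dom_check_raw_uniqueness board → Spec_check_raw_uniqueness board (check_raw_uniqueness board)

-- ===== LEMMAS AND PROOFS =====

def pvFilt (cs : List Char) : List Char := cs.filter (fun c => decide (c ≠ '*' ∧ c ≠ ' '))

theorem pvRowNew_eq_filt (s : String) : pvRowNew s = pvFilt s.toList := by
  simpa [pvRowNew, pvFilt] using
    PySem.List.foldl_append_ite_eq_filter (l := s.toList)
      (p := fun c => c ≠ '*' ∧ c ≠ ' ') (acc := [])

theorem length_ofList_eq_dedup {α : Type} [DecidableEq α] [BEq α] [LawfulBEq α] (xs : List α) :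
    (PySem.Set.ofList xs).length = xs.dedup.length := by
  have h1 : (PySem.Set.ofList xs).dedup = PySem.Set.ofList xs :=
    List.dedup_eq_self.2 (PySem.Set.nodup_ofList xs)
  have h2 : (PySem.Set.ofList xs).toFinset = xs.toFinset := by
    ext a; simp [List.mem_toFinset, PySem.Set.mem_ofList]
  calc (PySem.Set.ofList xs).length = (PySem.Set.ofList xs).dedup.length := by rw [h1]
    _ = (PySem.Set.ofList xs).toFinset.card := (List.card_toFinset _).symm
    _ = xs.toFinset.card := by rw [h2]
    _ = xs.dedup.length := List.card_toFinset _

theorem length_ofList_eq_iff {α : Type} [DecidableEq α] [BEq α] [LawfulBEq α] (xs : List α) :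
    (PySem.Set.ofList xs).length = xs.length ↔ xs.Nodup := by
  rw [length_ofList_eq_dedup]
  constructor
  · intro h
    exact List.dedup_eq_self.1 ((List.dedup_sublist xs).eq_of_length h)
  · intro h; rw [List.dedup_eq_self.2 h]

-- pvAdjDup = false ↔ no equal neighbours
theorem pvAdjDup_false_iff (l : List Char) : pvAdjDup l = false ↔ List.IsChain (· ≠ ·) l := by
  induction l with
  | nil => simp [pvAdjDup]
  | cons a t ih =>
    cases t with
    | nil => simp [pvAdjDup]
    | cons b t' =>
      rw [List.isChain_cons_cons, ← ih]
      simp only [pvAdjDup, Bool.or_eq_false_iff, beq_eq_false_iff_ne]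

theorem pv_chain_lt (l : List Char) (hpw : l.Pairwise (· ≤ ·))
    (hc : List.IsChain (· ≠ ·) l) : List.IsChain (· < ·) l := by
  induction l with
  | nil => simp
  | cons a t ih =>
    cases t with
    | nil => simp
    | cons b t' =>
      rw [List.isChain_cons_cons] at hc ⊢
      have hab : a ≤ b := (List.pairwise_cons.1 hpw).1 b List.mem_cons_self
      exact ⟨lt_of_le_of_ne hab hc.1, ih (List.pairwise_cons.1 hpw).2 hc.2⟩

-- on a (≤)-sorted list, no equal neighbours ↔ Nodup
theorem chain'_ne_iff_nodup (l : List Char) (hs : l.Pairwise (· ≤ ·)) :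
    List.IsChain (· ≠ ·) l ↔ l.Nodup := by
  constructor
  · intro hc
    exact (List.isChain_iff_pairwise.1 (pv_chain_lt l hs hc)).imp ne_of_lt
  · intro hn
    exact hn.isChain

theorem pv_row_key (s : String) :
    (!pvAdjDup (PySem.List.sorted (pvFilt s.toList) (fun x => x) false))
      = decide (pvFilt s.toList).Nodup := by
  set l := PySem.List.sorted (pvFilt s.toList) (fun x => x) false with hl
  have hperm : l.Perm (pvFilt s.toList) := PySem.List.sorted_perm _ _ _
  have hpw : l.Pairwise (· ≤ ·) := by
    simpa using PySem.List.sorted_pairwise (xs := pvFilt s.toList) (key := fun x => x)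
  have hiff : pvAdjDup l = false ↔ (pvFilt s.toList).Nodup := by
    rw [pvAdjDup_false_iff, chain'_ne_iff_nodup l hpw]
    exact hperm.nodup_iff
  rcases hd : pvAdjDup l with _ | _
  · simp [hiff.1 hd]
  · have : ¬ (pvFilt s.toList).Nodup := fun h => by
      have := hiff.2 h; rw [hd] at this; exact Bool.noConfusion this
    simp [this]

theorem pv_main (board : List String) :
    check_raw_uniqueness board = check_raw_uniqueness_alt board := by
  induction board with
  | nil => rfl
  | cons row rest ih =>
    simp only [check_raw_uniqueness, check_raw_uniqueness_alt]
    have hf : row.toList.filter (fun c => decide (c ≠ '*' ∧ c ≠ ' ')) = pvFilt row.toList := rfl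
    rw [hf]
    have hk := pv_row_key row
    by_cases hn : (pvFilt row.toList).Nodup
    · have hlen : ¬ (pvRowNew row).length ≠ (PySem.Set.ofList (pvRowNew row)).length := by
        rw [pvRowNew_eq_filt]
        simp [((length_ofList_eq_iff _).2 hn).symm]
      rw [if_neg hlen, ih]
      have : (!pvAdjDup (PySem.List.sorted (pvFilt row.toList) (fun x => x) false)) = true := by
        rw [hk]; simp [hn]
      rw [this, Bool.true_and]
    · have hlen : (pvRowNew row).length ≠ (PySem.Set.ofList (pvRowNew row)).length := by
        rw [pvRowNew_eq_filt]
        intro h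
        exact hn ((length_ofList_eq_iff _).1 h.symm)
      rw [if_pos hlen]
      have : (!pvAdjDup (PySem.List.sorted (pvFilt row.toList) (fun x => x) false)) = false := by
        rw [hk]; simp [hn]
      rw [this, Bool.false_and]

-- ===== VERDICT =====
theorem check_raw_uniqueness_spec : Claim_equal_check_raw_uniqueness := by
  intro board _
  unfold Spec_check_raw_uniqueness
  exact pv_main board
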